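-- pv_equiv track=rewrite | github.com/pypi-data/pypi-mirror-299 | packages/PipelineProcessor/pipelineprocessor-0.1.1-py3-none-any.whl/PipelineProcessor/StreamFunctionRepository.py | _coalesce_empty_lines
-- ===== SOURCE A (Python) =====
-- from typing import Iterator
--
-- def _coalesce_empty_lines(lines: Iterator[str], **kwargs) -> Iterator[str]:
--     """
--     Coalesces multiple consecutive empty lines into a single empty line.
--
--     Args:
--         lines (Iterator[str]): An iterator of strings from which to coalesce empty lines.
--
--     Yields:
--         Iterator[str]: An iterator of strings with consecutive empty lines coalesced.
--     """
--     empty_line_found = False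
--     for line in lines:
--         if line.strip() == "":
--             if not empty_line_found:
--                 empty_line_found = True
--                 yield line
--         else:
--             empty_line_found = False
--             yield line
-- ===== SOURCE B (Python) =====
-- from itertools import groupby
--
-- def _coalesce_empty_lines(lines, **kwargs):
--     for is_empty, group in groupby(lines, key=lambda l: l.strip() == ""):
--         if is_empty:
--             yield next(group)
--         else:
--             yield from group
-- ===== Notes on version B (the rewrite author's own statement) =====
-- stated objective: idiomatic
-- what changed: Replaces the per-line boolean state flag with itertools.groupby partitioning the stream into maximal blank/non-blank runs, yielding the first line of each blank run and every line of each non-blank run.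
import Mathlib
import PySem

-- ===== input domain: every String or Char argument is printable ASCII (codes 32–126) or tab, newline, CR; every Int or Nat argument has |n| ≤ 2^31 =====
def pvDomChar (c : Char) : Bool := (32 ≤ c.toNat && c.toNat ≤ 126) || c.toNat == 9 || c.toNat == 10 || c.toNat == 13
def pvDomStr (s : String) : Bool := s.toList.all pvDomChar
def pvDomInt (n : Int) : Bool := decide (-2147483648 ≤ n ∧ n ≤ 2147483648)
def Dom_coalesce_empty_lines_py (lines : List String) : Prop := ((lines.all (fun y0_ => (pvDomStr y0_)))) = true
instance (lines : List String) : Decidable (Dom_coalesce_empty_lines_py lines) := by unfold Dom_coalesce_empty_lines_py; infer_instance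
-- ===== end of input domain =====

-- B replaces A's per-line boolean flag by grouping the stream into maximal blank/non-blank
-- runs (itertools.groupby), keeping the first line of each blank run (idiomatic; same cost).

-- line.strip() == ""
def pvBlank (s : String) : Bool := PySem.Str.strip s == ""

-- ===== PORT A =====
-- A's generator loop with its state flag `empty_line_found`, transliterated as structural
-- recursion carrying the flag.
def pvALoop : Bool → List String → List String
  | _, [] => []
  | emptyLineFound, l :: ls =>
    if pvBlank l then
      if !emptyLineFound then l :: pvALoop true ls
      else pvALoop true ls
    else
      l :: pvALoop false ls

def coalesce_empty_lines_py (lines : List String) : List String :=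
  pvALoop false lines

-- ===== PORT B =====
-- B's groupby loop: each step consumes one maximal run of equal blank-ness; a blank run
-- contributes its first element, a non-blank run contributes all its elements.
def pvBLoop (lines : List String) : List String :=
  match lines with
  | [] => []
  | l :: ls =>
    if pvBlank l then
      l :: pvBLoop (ls.dropWhile pvBlank)
    else
      (l :: ls.takeWhile (fun s => !pvBlank s)) ++ pvBLoop (ls.dropWhile (fun s => !pvBlank s))
  termination_by lines.length
  decreasing_by
  · simpa using Nat.lt_succ_of_le (List.length_dropWhile_le pvBlank ls)
  · simpa using Nat.lt_succ_of_le (List.length_dropWhile_le _ ls)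

def coalesce_empty_lines_py_alt (lines : List String) : List String :=
  pvBLoop lines

-- ===== PRECONDITION & SPEC =====
def Spec_coalesce_empty_lines_py (lines : List String) (out : List String) : Prop := out = coalesce_empty_lines_py_alt lines
instance (lines : List String) (out : List String) : Decidable (Spec_coalesce_empty_lines_py lines out) := by unfold Spec_coalesce_empty_lines_py; infer_instance

-- ===== CLAIM (what is proved, stated in full; the proofs are below) =====
def Claim_equal_coalesce_empty_lines_py : Prop := ∀ (lines : List String), Dom_coalesce_empty_lines_py lines → Spec_coalesce_empty_lines_py lines (coalesce_empty_lines_py lines)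

-- ===== LEMMAS AND PROOFS =====

-- With the flag set, A skips leading blank lines, i.e. behaves like flag-off after dropping them.
theorem pvALoop_true_eq (ls : List String) :
    pvALoop true ls = pvALoop false (ls.dropWhile pvBlank) := by
  induction ls with
  | nil => simp [pvALoop]
  | cons l ls ih =>
    by_cases h : pvBlank l = true
    · simp [pvALoop, h, List.dropWhile, ih]
    · simp only [Bool.not_eq_true] at h
      simp [pvALoop, h, List.dropWhile]

-- With the flag off, A copies the leading non-blank run verbatim.
theorem pvALoop_false_run (ls : List String) :
    pvALoop false ls =
      ls.takeWhile (fun s => !pvBlank s) ++ pvALoop false (ls.dropWhile (fun s => !pvBlank s)) := by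
  induction ls with
  | nil => simp [pvALoop]
  | cons l ls ih =>
    by_cases h : pvBlank l = true
    · simp [List.takeWhile, List.dropWhile, h]
    · simp only [Bool.not_eq_true] at h
      simp [pvALoop, List.takeWhile, List.dropWhile, h, ih]

theorem pvBLoop_eq (ls : List String) : pvBLoop ls = pvALoop false ls := by
  induction hn : ls.length using Nat.strong_induction_on generalizing ls with
  | _ n ih =>
    match ls with
    | [] => simp [pvBLoop, pvALoop]
    | l :: ls =>
      by_cases h : pvBlank l = true
      · rw [pvBLoop]
        simp only [h, if_true]
        rw [ih (ls.dropWhile pvBlank).length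
            (by simpa [← hn] using Nat.lt_succ_of_le (List.length_dropWhile_le pvBlank ls)) _ rfl]
        simp [pvALoop, h, pvALoop_true_eq]
      · rw [pvBLoop]
        simp only [h]
        rw [ih (ls.dropWhile (fun s => !pvBlank s)).length
            (by simpa [← hn] using Nat.lt_succ_of_le (List.length_dropWhile_le _ ls)) _ rfl]
        simp only [Bool.not_eq_true] at h
        simp [pvALoop, h]
        exact (pvALoop_false_run ls).symm

-- ===== VERDICT (by name: the statement is the Claim_ definition above) =====
theorem coalesce_empty_lines_py_spec : Claim_equal_coalesce_empty_lines_py := by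
  intro lines _
  unfold Spec_coalesce_empty_lines_py coalesce_empty_lines_py coalesce_empty_lines_py_alt
  exact (pvBLoop_eq lines).symm
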